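-- pv_equiv track=rewrite | github.com/mpherman1/assembler | assem.py | F2Split
-- ===== SOURCE A (Python) =====
-- OPERANDFIELD = 2
--
-- def F2Split(row):
--     """Splits up the operand field into it's individual operands"""
--     one = ""
--     two = ""
--     sections = [one,two]
--     fin = []
--     i = 0
--     for section in sections:
--         #Stop for new line, tabs, and spaces
--         while i < len(row[OPERANDFIELD]) and  row[OPERANDFIELD][i] != ',':
--             section += row[OPERANDFIELD][i]
--             i += 1
--         fin.append(section)
--         i += 1
--
--     return fin
-- ===== SOURCE B (Python) =====
-- OPERANDFIELD = 2
--
-- def F2Split(row):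
--     """Splits up the operand field into it's individual operands"""
--     parts = row[OPERANDFIELD].split(',')
--     return [parts[0], parts[1] if len(parts) > 1 else '']
-- ===== Notes on version B (the rewrite author's own statement) =====
-- stated objective: idiomatic
-- what changed: Replaced the manual index-driven double while-loop character scan with a single str.split(',') call plus indexing/padding to exactly two fields.
import Mathlib
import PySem

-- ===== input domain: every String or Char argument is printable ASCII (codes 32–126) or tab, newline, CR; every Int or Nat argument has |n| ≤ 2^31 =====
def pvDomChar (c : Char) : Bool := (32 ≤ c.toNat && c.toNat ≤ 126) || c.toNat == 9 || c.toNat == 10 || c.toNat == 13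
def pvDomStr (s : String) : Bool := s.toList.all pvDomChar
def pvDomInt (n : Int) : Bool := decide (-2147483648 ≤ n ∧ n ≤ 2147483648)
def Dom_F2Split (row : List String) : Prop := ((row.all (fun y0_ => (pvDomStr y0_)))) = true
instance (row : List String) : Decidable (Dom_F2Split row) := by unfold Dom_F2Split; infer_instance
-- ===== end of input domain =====

-- B replaces A's manual index-driven two-section character scan with one split(',') call
-- plus padding/truncation to exactly two fields (objective: idiomatic; return value only).

-- ===== PORT A =====
-- A's inner `while i < len(op) and op[i] != ','` scanning forward from index i is ported as
-- structural recursion on the remaining suffix of characters (the `i += 1` comma-skip after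
-- the loop is consuming the comma when the loop stops on it; the remainder is returned).
def F2SplitLoop : List Char → String → String × List Char
  | [], sec => (sec, [])
  | c :: rest, sec => if c = ',' then (sec, rest) else F2SplitLoop rest (sec.push c)

def F2Split (row : List String) : List String :=
  let op := ((PySem.List.pyGet? row 2).getD "").toList
  let p1 := F2SplitLoop op ""
  let p2 := F2SplitLoop p1.2 ""
  [p1.1, p2.1]

-- ===== PORT B =====
def F2Split_alt (row : List String) : List String :=
  let parts := (PySem.Chars.splitOn ((PySem.List.pyGet? row 2).getD "").toList (",".toList)).map String.ofList
  [(PySem.List.pyGet? parts 0).getD "",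
   if 1 < parts.length then (PySem.List.pyGet? parts 1).getD "" else ""]

-- ===== PRECONDITION & SPEC =====
-- Pre_ excludes rows with fewer than 3 entries, on which Python A raises IndexError at row[2].
def Pre_F2Split (row : List String) : Prop := 3 ≤ row.length
instance (row : List String) : Decidable (Pre_F2Split row) := by unfold Pre_F2Split; infer_instance
def pvWitness_F2Split : List String := ["LBL", "ADD", "R1,R2"]

def Spec_F2Split (row : List String) (out : List String) : Prop := out = F2Split_alt row
instance (row : List String) (out : List String) : Decidable (Spec_F2Split row out) := by unfold Spec_F2Split; infer_instance

-- ===== CLAIM (what is proved, stated in full; the proofs are below) =====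
def Claim_equal_F2Split : Prop := ∀ (row : List String), Dom_F2Split row → Pre_F2Split row → Spec_F2Split row (F2Split row)

-- ===== LEMMAS AND PROOFS =====

-- Specification version of splitting a char list on ','.
def pvP : List Char → List (List Char)
  | [] => [[]]
  | c :: r => if c = ',' then [] :: pvP r else (pvP r).modifyHead (c :: ·)

theorem pvP_ne_nil (l : List Char) : pvP l ≠ [] := by
  induction l with
  | nil => simp [pvP]
  | cons c r ih =>
    simp only [pvP]
    split
    · simp
    · cases h : pvP r with
      | nil => exact absurd h ih
      | cons a t => simp [List.modifyHead]

theorem pvSplitOn_go_eq (fuel : Nat) : ∀ (l cur : List Char) (accs : List (List Char)),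
    l.length < fuel →
    PySem.Chars.splitOn.go [','] fuel l cur accs.reverse
      = accs ++ (pvP l).modifyHead (cur.reverse ++ ·) := by
  induction fuel with
  | zero => intro l cur accs h; omega
  | succ n ih =>
    intro l cur accs h
    cases l with
    | nil =>
      simp [PySem.Chars.splitOn.go, pvP, List.modifyHead]
    | cons c rest =>
      simp only [PySem.Chars.splitOn.go]
      by_cases hc : c = ','
      · subst hc
        have hpre : [','].isPrefixOf (',' :: rest) = true := by
          simp [List.isPrefixOf]
        rw [if_pos hpre]
        have : (cur.reverse :: accs.reverse) = (accs ++ [cur.reverse]).reverse := by simp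
        simp only [List.length_cons, List.length_nil, Nat.zero_add, List.drop_succ_cons, List.drop_zero, this]
        rw [ih rest [] (accs ++ [cur.reverse]) (by simpa using Nat.lt_of_succ_lt_succ h)]
        simp only [pvP, List.modifyHead]
        cases pvP rest <;> simp
      · have hpre : [','].isPrefixOf (c :: rest) = false := by
          simp only [List.isPrefixOf, Bool.and_eq_false_iff]
          exact Or.inl (beq_eq_false_iff_ne.mpr (fun h' => hc h'.symm))
        rw [hpre, if_neg (by simp)]
        rw [ih rest (c :: cur) accs (by simpa using Nat.lt_of_succ_lt_succ h)]
        have hne := pvP_ne_nil rest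
        cases hp : pvP rest with
        | nil => exact absurd hp hne
        | cons a t => simp [pvP, hc, hp, List.modifyHead]

theorem pvSplitOn_eq (l : List Char) : PySem.Chars.splitOn l [','] = pvP l := by
  have h := pvSplitOn_go_eq (l.length + 1) l [] [] (by omega)
  simp only [PySem.Chars.splitOn, List.reverse_nil, List.nil_append, List.modifyHead] at h ⊢
  rw [h]
  cases pvP l <;> simp

theorem F2SplitLoop_spec (l : List Char) : ∀ (sec : String),
    (F2SplitLoop l sec).1 = String.ofList (sec.toList ++ (pvP l).headD [])
    ∧ pvP (F2SplitLoop l sec).2 = (if (pvP l).tail = [] then [[]] else (pvP l).tail) := by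
  induction l with
  | nil =>
    intro sec
    simp [F2SplitLoop, pvP]
  | cons c r ih =>
    intro sec
    simp only [F2SplitLoop, pvP]
    by_cases hc : c = ','
    · subst hc
      constructor
      · simp [String.ofList]
      · simp [pvP_ne_nil r]
    · rw [if_neg hc, if_neg hc]
      obtain ⟨ih1, ih2⟩ := ih (sec.push c)
      cases h : pvP r with
      | nil => exact absurd h (pvP_ne_nil r)
      | cons a t =>
        constructor
        · rw [ih1, h]
          simp [List.modifyHead, String.ofList]
        · rw [ih2, h]
          simp [List.modifyHead]

theorem pvPyGetD_zero {α : Type} (x : α) (t : List α) (d : α) :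
    (PySem.List.pyGet? (x :: t) 0).getD d = x := by
  simp [PySem.List.pyGet?, PySem.List.pyIdx?]

theorem pvPyGetD_one {α : Type} (x y : α) (t : List α) (d : α) :
    (PySem.List.pyGet? (x :: y :: t) 1).getD d = y := by
  simp [PySem.List.pyGet?, PySem.List.pyIdx?]

theorem F2Split_eq_alt (row : List String) : F2Split row = F2Split_alt row := by
  unfold F2Split F2Split_alt
  simp only []
  set op := ((PySem.List.pyGet? row 2).getD "").toList with hop
  obtain ⟨h11, h12⟩ := F2SplitLoop_spec op ""
  obtain ⟨h21, h22⟩ := F2SplitLoop_spec (F2SplitLoop op "").2 ""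
  have hsep : (",".toList : List Char) = [','] := rfl
  rw [hsep, pvSplitOn_eq]
  cases hp : pvP op with
  | nil => exact absurd hp (pvP_ne_nil op)
  | cons a t =>
    cases ht : t with
    | nil =>
      have hr1 : pvP (F2SplitLoop op "").2 = [[]] := by
        rw [h12, hp, ht]; simp
      simp only [List.map_cons, List.map_nil, List.length_cons, List.length_nil]
      rw [h11, hp]
      rw [h21, hr1]
      rw [pvPyGetD_zero]
      simp
    | cons b t' =>
      have hr1 : pvP (F2SplitLoop op "").2 = b :: t' := by
        rw [h12, hp, ht]; simp
      simp only [List.map_cons, List.length_cons]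
      rw [h11, hp]
      rw [h21, hr1]
      rw [pvPyGetD_zero, pvPyGetD_one]
      simp

-- ===== VERDICT (by name: the statement is the Claim_ definition above) =====


theorem F2Split_spec : Claim_equal_F2Split := by
  intro row _ _
  exact F2Split_eq_alt row
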